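-- pv_equiv track=rewrite | github.com/elielloyd/tc-lambdas | poi-calculation/lambda_function.py | map_poi_to_standard_format
-- ===== SOURCE A (Python) =====
-- def map_poi_to_standard_format(poi):
--     """
--     Map POI values to standard format and split combined POIs.
--
--     Args:
--         poi: POI string (e.g., "Front", "FrontLeft", "Rear", etc.)
--
--     Returns:
--         list: List of standard POI strings
--     """
--     poi = poi.strip()
--
--     # Available standard POI options
--     valid_pois = {
--         "Front", "Rear", "Left", "Right",
--         "Engine / Electrical", "Interior", "Steering / Suspension", "A/C", "Frame / Floor"
--     }
--
--     # Mapping for combined POIs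
--     combined_poi_mapping = {
--         "FrontLeft": ["Front", "Left"],
--         "FrontRight": ["Front", "Right"],
--         "RearLeft": ["Rear", "Left"],
--         "RearRight": ["Rear", "Right"]
--     }
--
--     # Check if it's a combined POI
--     if poi in combined_poi_mapping:
--         return combined_poi_mapping[poi]
--
--     # If it's already a valid POI, return it as a list
--     if poi in valid_pois:
--         return [poi]
--
--     # For "Roof" or other unmapped values, return empty list (or map as needed)
--     # You can add custom mapping here if needed
--     if poi == "Roof":
--         return []  # Roof is not in the standard list, exclude it
--
--     # If it's not recognized, try to return as-is if it matches a valid POI (case-insensitive)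
--     poi_lower = poi.lower()
--     for valid_poi in valid_pois:
--         if valid_poi.lower() == poi_lower:
--             return [valid_poi]
--
--     # Return empty list for unrecognized POIs
--     return []
-- ===== SOURCE B (Python) =====
-- # B parses combined POIs structurally (exact-case axis prefix + side suffix split)
-- # instead of storing them in a dict, and resolves single POIs by one lowercase table lookup.
-- _CANONICAL = {v.lower(): v for v in [
--     "Front", "Rear", "Left", "Right",
--     "Engine / Electrical", "Interior", "Steering / Suspension", "A/C", "Frame / Floor",
-- ]}
--
-- def map_poi_to_standard_format(poi):
--     poi = poi.strip()
--     # combined POI = exact-case "Front"/"Rear" immediately followed by "Left"/"Right"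
--     for axis in ("Front", "Rear"):
--         if poi.startswith(axis):
--             side = poi[len(axis):]
--             if side in ("Left", "Right"):
--                 return [axis, side]
--     canon = _CANONICAL.get(poi.lower())
--     return [canon] if canon is not None else []
-- ===== Notes on version B (the rewrite author's own statement) =====
-- stated objective: alternative
-- what changed: B drops A's combined-POI dict, exact-membership set test, Roof branch and case-insensitive scan loop: it parses combined POIs structurally (exact-case Front/Rear prefix plus Left/Right remainder of the string) and resolves single POIs by one precomputed lowercase->canonical table lookup.
import Mathlib
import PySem

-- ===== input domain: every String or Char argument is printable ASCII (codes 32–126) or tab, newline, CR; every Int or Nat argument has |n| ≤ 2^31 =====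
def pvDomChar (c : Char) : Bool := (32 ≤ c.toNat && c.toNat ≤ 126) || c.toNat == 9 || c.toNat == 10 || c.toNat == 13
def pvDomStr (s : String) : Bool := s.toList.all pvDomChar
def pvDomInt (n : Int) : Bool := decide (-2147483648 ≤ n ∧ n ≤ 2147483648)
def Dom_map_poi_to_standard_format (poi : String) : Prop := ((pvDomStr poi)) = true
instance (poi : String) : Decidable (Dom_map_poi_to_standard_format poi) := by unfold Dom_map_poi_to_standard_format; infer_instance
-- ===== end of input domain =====

-- B parses combined POIs structurally (exact-case Front/Rear prefix + Left/Right remainder)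
-- instead of A's combined-POI dict, and resolves single POIs by one lowercase table lookup
-- instead of A's set test, Roof branch and case-insensitive scan loop (objective: alternative).

-- ===== PORT A =====
-- valid_pois (a Python set literal)
def pvValidPois : PySem.Set String :=
  PySem.Set.ofList ["Front", "Rear", "Left", "Right",
    "Engine / Electrical", "Interior", "Steering / Suspension", "A/C", "Frame / Floor"]

-- combined_poi_mapping
def pvCombined : PySem.Dict String (List String) :=
  PySem.Dict.ofList [("FrontLeft", ["Front", "Left"]), ("FrontRight", ["Front", "Right"]),
    ("RearLeft", ["Rear", "Left"]), ("RearRight", ["Rear", "Right"])]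

-- the final 'for valid_poi in valid_pois: if valid_poi.lower() == poi_lower: return [valid_poi]'
def pvScanValid (poiLower : String) : List String → List String
  | [] => []
  | v :: rest => if PySem.Str.lower v == poiLower then [v] else pvScanValid poiLower rest

def map_poi_to_standard_format (poi : String) : List String :=
  let poi := PySem.Str.strip poi
  match PySem.Dict.get? pvCombined poi with      -- 'if poi in combined: return combined[poi]'
  | some v => v
  | none =>
    if PySem.Set.contains pvValidPois poi then [poi]
    else if poi == "Roof" then []
    else pvScanValid (PySem.Str.lower poi) pvValidPois

-- ===== PORT B =====
-- _CANONICAL = {v.lower(): v for v in [...]}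
def pvCanonical : PySem.Dict String String :=
  PySem.Dict.ofList ((["Front", "Rear", "Left", "Right",
    "Engine / Electrical", "Interior", "Steering / Suspension", "A/C", "Frame / Floor"]).map
      (fun v => (PySem.Str.lower v, v)))

-- 'for axis in ("Front", "Rear"): if poi.startswith(axis): side = poi[len(axis):]; if side in ("Left","Right"): return [axis, side]'
def pvTryCombined (poi : String) : List String → Option (List String)
  | [] => none
  | axis :: rest =>
    if PySem.Str.startswith poi axis then
      let side := PySem.Str.slice poi (some (PySem.Str.len axis : Int)) none
      if side == "Left" || side == "Right" then some [axis, side]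
      else pvTryCombined poi rest
    else pvTryCombined poi rest

def map_poi_to_standard_format_alt (poi : String) : List String :=
  let poi := PySem.Str.strip poi
  match pvTryCombined poi ["Front", "Rear"] with
  | some v => v
  | none =>
    match PySem.Dict.get? pvCanonical (PySem.Str.lower poi) with
    | some canon => [canon]
    | none => []

-- ===== PRECONDITION & SPEC =====
def Spec_map_poi_to_standard_format (poi : String) (out : List String) : Prop := out = map_poi_to_standard_format_alt poi
instance (poi : String) (out : List String) : Decidable (Spec_map_poi_to_standard_format poi out) := by unfold Spec_map_poi_to_standard_format; infer_instance

-- ===== CLAIM (what is proved, stated in full; the proofs are below) =====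
def Claim_equal_map_poi_to_standard_format : Prop := ∀ (poi : String), Dom_map_poi_to_standard_format poi → Spec_map_poi_to_standard_format poi (map_poi_to_standard_format poi)

-- ===== LEMMAS AND PROOFS =====

-- a true startswith splits the string into the prefix and the tail slice
theorem split_of_startswith (s p : String) (h : PySem.Str.startswith s p = true) :
    s.toList = p.toList ++ (PySem.Str.slice s (some (PySem.Str.len p : Int)) none).toList := by
  have hp : p.toList <+: s.toList := by
    have := PySem.Chars.startswith_iff (s := s.toList) (p := p.toList)
    simp at h; exact this.mp h
  have hd : (PySem.Str.slice s (some (PySem.Str.len p : Int)) none).toList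
      = s.toList.drop p.toList.length := by
    simp [PySem.Str.len_eq, PySem.List.slice_from_natCast]
  obtain ⟨t, ht⟩ := hp
  rw [hd, ← ht]; simp

-- if B's loop fires, the string is some listed axis glued to "Left" or "Right"
theorem tryCombined_mem (s : String) (axes : List String) (v : List String)
    (h : pvTryCombined s axes = some v) :
    ∃ axis ∈ axes, ∃ side, (side = "Left" ∨ side = "Right") ∧
      s.toList = axis.toList ++ side.toList := by
  induction axes with
  | nil => cases h
  | cons a rest ih =>
    simp only [pvTryCombined] at h
    split_ifs at h with h1 h2
    · refine ⟨a, by simp, PySem.Str.slice s (some (PySem.Str.len a : Int)) none, ?_,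
        split_of_startswith s a h1⟩
      rcases Bool.or_eq_true_iff.mp h2 with hl | hr
      · exact Or.inl (by simpa using hl)
      · exact Or.inr (by simpa using hr)
    · obtain ⟨ax, hm, rest'⟩ := ih h
      exact ⟨ax, by simp [hm], rest'⟩
    · obtain ⟨ax, hm, rest'⟩ := ih h
      exact ⟨ax, by simp [hm], rest'⟩

-- if the prefix/suffix parse fires, the string is one of the four combined POIs
theorem tryCombined_some (s : String) (v : List String)
    (h : pvTryCombined s ["Front", "Rear"] = some v) :
    s = "FrontLeft" ∨ s = "FrontRight" ∨ s = "RearLeft" ∨ s = "RearRight" := by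
  obtain ⟨axis, hmem, side, hside, heq⟩ := tryCombined_mem s _ v h
  have hax : axis = "Front" ∨ axis = "Rear" := by simpa using hmem
  rcases hax with rfl | rfl <;> rcases hside with rfl | rfl
  · exact Or.inl (String.toList_inj.mp (by rw [heq]; decide))
  · exact Or.inr (Or.inl (String.toList_inj.mp (by rw [heq]; decide)))
  · exact Or.inr (Or.inr (Or.inl (String.toList_inj.mp (by rw [heq]; decide))))
  · exact Or.inr (Or.inr (Or.inr (String.toList_inj.mp (by rw [heq]; decide))))

theorem core_eq (s : String) :
    (match PySem.Dict.get? pvCombined s with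
     | some v => v
     | none =>
       if PySem.Set.contains pvValidPois s then [s]
       else if s == "Roof" then []
       else pvScanValid (PySem.Str.lower s) pvValidPois) =
    (match pvTryCombined s ["Front", "Rear"] with
     | some v => v
     | none =>
       match PySem.Dict.get? pvCanonical (PySem.Str.lower s) with
       | some canon => [canon]
       | none => []) := by
  by_cases e1 : s = "FrontLeft"; · subst e1; decide
  by_cases e2 : s = "FrontRight"; · subst e2; decide
  by_cases e3 : s = "RearLeft"; · subst e3; decide
  by_cases e4 : s = "RearRight"; · subst e4; decide
  by_cases f1 : s = "Front"; · subst f1; decide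
  by_cases f2 : s = "Rear"; · subst f2; decide
  by_cases f3 : s = "Left"; · subst f3; decide
  by_cases f4 : s = "Right"; · subst f4; decide
  by_cases f5 : s = "Engine / Electrical"; · subst f5; decide
  by_cases f6 : s = "Interior"; · subst f6; decide
  by_cases f7 : s = "Steering / Suspension"; · subst f7; decide
  by_cases f8 : s = "A/C"; · subst f8; decide
  by_cases f9 : s = "Frame / Floor"; · subst f9; decide
  by_cases g : s = "Roof"; · subst g; decide
  -- residual case: B's parse cannot fire
  have htry : pvTryCombined s ["Front", "Rear"] = none := by
    cases htc : pvTryCombined s ["Front", "Rear"] with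
    | none => rfl
    | some v =>
      rcases tryCombined_some s v htc with rfl | rfl | rfl | rfl
      · exact absurd rfl e1
      · exact absurd rfl e2
      · exact absurd rfl e3
      · exact absurd rfl e4
  rw [htry]
  have hc : pvCombined = PySem.Dict.mk [("FrontLeft", ["Front", "Left"]), ("FrontRight", ["Front", "Right"]), ("RearLeft", ["Rear", "Left"]), ("RearRight", ["Rear", "Right"])] := by decide
  have hv : pvValidPois = ["Front", "Rear", "Left", "Right", "Engine / Electrical", "Interior", "Steering / Suspension", "A/C", "Frame / Floor"] := by decide
  have hl : pvCanonical = PySem.Dict.mk [("front","Front"),("rear","Rear"),("left","Left"),("right","Right"),("engine / electrical","Engine / Electrical"),("interior","Interior"),("steering / suspension","Steering / Suspension"),("a/c","A/C"),("frame / floor","Frame / Floor")] := by decide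
  rw [hc, hv, hl]
  simp only [pvScanValid, PySem.Set.contains, PySem.Dict.get?_mk_cons,
    (by decide : PySem.Str.lower "Front" = "front"),
    (by decide : PySem.Str.lower "Rear" = "rear"),
    (by decide : PySem.Str.lower "Left" = "left"),
    (by decide : PySem.Str.lower "Right" = "right"),
    (by decide : PySem.Str.lower "Engine / Electrical" = "engine / electrical"),
    (by decide : PySem.Str.lower "Interior" = "interior"),
    (by decide : PySem.Str.lower "Steering / Suspension" = "steering / suspension"),
    (by decide : PySem.Str.lower "A/C" = "a/c"),
    (by decide : PySem.Str.lower "Frame / Floor" = "frame / floor")]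
  simp [Ne.symm e1, Ne.symm e2, Ne.symm e3, Ne.symm e4, g,
    f1, f2, f3, f4, f5, f6, f7, f8, f9, PySem.Dict.get?]
  generalize PySem.Str.lower s = l
  by_cases l1 : l = "front"; · subst l1; decide
  by_cases l2 : l = "rear"; · subst l2; decide
  by_cases l3 : l = "left"; · subst l3; decide
  by_cases l4 : l = "right"; · subst l4; decide
  by_cases l5 : l = "engine / electrical"; · subst l5; decide
  by_cases l6 : l = "interior"; · subst l6; decide
  by_cases l7 : l = "steering / suspension"; · subst l7; decide
  by_cases l8 : l = "a/c"; · subst l8; decide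
  by_cases l9 : l = "frame / floor"; · subst l9; decide
  simp [Ne.symm l1, Ne.symm l2, Ne.symm l3, Ne.symm l4, Ne.symm l5, Ne.symm l6, Ne.symm l7,
    Ne.symm l8, Ne.symm l9]

-- ===== VERDICT (by name: the statement is the Claim_ definition above) =====
theorem map_poi_to_standard_format_spec : Claim_equal_map_poi_to_standard_format := by
  intro poi _
  unfold Spec_map_poi_to_standard_format map_poi_to_standard_format map_poi_to_standard_format_alt
  exact core_eq (PySem.Str.strip poi)
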